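-- pv_equiv track=rewrite | github.com/victorbluhu/Finance | Factor Analysis/Bryzgalova.py | getSplitableNodes
-- ===== SOURCE A (Python) =====
-- def generateNodeNames(parentName = '1L', char_name = 'C2'):
--
--     if parentName == 'Main':
--         parentName = ''
--
--     char_number = char_name[1:]
--
--     return parentName + char_number + 'L', parentName + char_number + 'H'
--
-- def getNodeDepth(nodeName):
--     if nodeName == 'Main':
--         return 0
--     else:
--         return len(nodeName)//2
--
-- def getSplitableNodes(tree, sequence = ('C1','C2','C2')):
--
--     splitableNodes = []
--     for x in tree:
--         depth = getNodeDepth(x)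
--         if depth < len(sequence):
--             l, r = generateNodeNames(x, sequence[depth])
--             if l in tree or r in tree:
--                 continue
--             else:
--                 splitableNodes.append(x)
--
--     return splitableNodes
-- ===== SOURCE B (Python) =====
-- def generateNodeNames(parentName = '1L', char_name = 'C2'):
--
--     if parentName == 'Main':
--         parentName = ''
--
--     char_number = char_name[1:]
--
--     return parentName + char_number + 'L', parentName + char_number + 'H'
--
-- def getNodeDepth(nodeName):
--     if nodeName == 'Main':
--         return 0
--     else:
--         return len(nodeName)//2
--
-- def getSplitableNodes(tree, sequence = ('C1','C2','C2')):
--     # Index every generated child name by its parents, then mark the parents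
--     # whose children actually occur in the tree; a single filter pass finishes.
--     nseq = len(sequence)
--     parent_of = {}
--     for x in tree:
--         depth = getNodeDepth(x)
--         if depth < nseq:
--             for child in generateNodeNames(x, sequence[depth]):
--                 parent_of.setdefault(child, []).append(x)
--     occupied = set()
--     for y in tree:
--         occupied.update(parent_of.get(y, ()))
--     return [x for x in tree if getNodeDepth(x) < nseq and x not in occupied]
-- ===== Notes on version B (the rewrite author's own statement) =====
-- stated objective: faster
-- what changed: Instead of scanning the whole tree list for both generated child names of every node, B builds a dict indexing each generated child name by its parents, marks the occupied parents in one pass over the tree, and filters the tree against that set.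
import Mathlib
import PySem

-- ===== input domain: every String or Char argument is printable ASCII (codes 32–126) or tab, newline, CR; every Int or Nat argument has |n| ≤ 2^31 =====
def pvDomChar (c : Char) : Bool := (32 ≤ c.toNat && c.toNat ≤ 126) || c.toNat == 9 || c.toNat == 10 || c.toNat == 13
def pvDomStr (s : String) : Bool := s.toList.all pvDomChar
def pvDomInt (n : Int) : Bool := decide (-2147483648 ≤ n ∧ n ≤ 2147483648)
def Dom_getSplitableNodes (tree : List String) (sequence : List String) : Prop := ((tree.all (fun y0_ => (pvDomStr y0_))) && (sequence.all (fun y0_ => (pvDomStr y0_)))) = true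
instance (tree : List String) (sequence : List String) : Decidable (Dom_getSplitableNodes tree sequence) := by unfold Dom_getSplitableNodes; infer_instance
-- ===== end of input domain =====

-- B replaces A's per-node scans of `tree` for both generated child names by a
-- dict indexing each child name by its parents, built in one pass, then a
-- marking pass and a filter.

-- ===== PORT A =====
def generateNodeNames (parentName : String) (char_name : String) : String × String :=
  let parentName := if parentName == "Main" then "" else parentName
  let char_number := PySem.Str.slice char_name (some 1) none
  (parentName ++ char_number ++ "L", parentName ++ char_number ++ "H")

def getNodeDepth (nodeName : String) : Int :=
  if nodeName == "Main" then 0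
  else PySem.Int.floordiv (PySem.Str.len nodeName) 2

def getSplitableNodes (tree : List String) (sequence : List String) : List String :=
  tree.foldl (fun splitableNodes x =>
    let depth := getNodeDepth x
    if depth < (sequence.length : Int) then
      let lr := generateNodeNames x (PySem.List.pyGetD sequence depth "")
      if tree.contains lr.1 || tree.contains lr.2 then
        splitableNodes
      else
        splitableNodes ++ [x]
    else splitableNodes) []

-- ===== PORT B =====
-- body of Source B's first loop: `for child in generateNodeNames(...)` iterates the
-- pair, `parent_of.setdefault(child, []).append(x)` is `modify child [] (· ++ [x])`
def gsnIndexStep (sequence : List String) (parent_of : PySem.Dict String (List String))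
    (x : String) : PySem.Dict String (List String) :=
  let depth := getNodeDepth x
  if depth < (sequence.length : Int) then
    let lr := generateNodeNames x (PySem.List.pyGetD sequence depth "")
    [lr.1, lr.2].foldl (fun m child => m.modify child [] (· ++ [x])) parent_of
  else parent_of

def getSplitableNodes_alt (tree : List String) (sequence : List String) : List String :=
  let parent_of := tree.foldl (gsnIndexStep sequence) PySem.Dict.empty
  let occupied : PySem.Set String :=
    tree.foldl (fun occupied y => PySem.Set.update occupied (parent_of.getD y [])) PySem.Set.empty
  tree.filter (fun x =>
    decide (getNodeDepth x < (sequence.length : Int)) && !(occupied.contains x))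

-- ===== PRECONDITION & SPEC =====
def Spec_getSplitableNodes (tree : List String) (sequence : List String) (out : List String) : Prop := out = getSplitableNodes_alt tree sequence
instance (tree : List String) (sequence : List String) (out : List String) : Decidable (Spec_getSplitableNodes tree sequence out) := by unfold Spec_getSplitableNodes; infer_instance

-- ===== CLAIM (what is proved, stated in full; the proofs are below) =====
def Claim_equal_getSplitableNodes : Prop := ∀ (tree : List String) (sequence : List String), Dom_getSplitableNodes tree sequence → Spec_getSplitableNodes tree sequence (getSplitableNodes tree sequence)

-- ===== LEMMAS AND PROOFS =====

-- generic: membership in an accumulated state after a foldl of enlarging steps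
theorem foldl_acc_mem {σ β γ : Type} (f : σ → β → σ) (mem : σ → γ → Prop) (P : β → γ → Prop)
    (h : ∀ s b q, mem (f s b) q ↔ mem s q ∨ P b q) :
    ∀ (l : List β) (s : σ) (q : γ), mem (l.foldl f s) q ↔ mem s q ∨ ∃ b ∈ l, P b q := by
  intro l
  induction l with
  | nil => simp
  | cons b l ih =>
    intro s q
    simp only [List.foldl_cons, ih, h, List.mem_cons]
    constructor
    · rintro ((hq | hb) | ⟨b', hb', hP⟩)
      · exact Or.inl hq
      · exact Or.inr ⟨b, Or.inl rfl, hb⟩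
      · exact Or.inr ⟨b', Or.inr hb', hP⟩
    · rintro (hq | ⟨b', (rfl | hb'), hP⟩)
      · exact Or.inl (Or.inl hq)
      · exact Or.inl (Or.inr hP)
      · exact Or.inr ⟨b', hb', hP⟩

-- one index step: which parents does `getD c []` gain?
theorem mem_getD_indexStep (sequence : List String) (m : PySem.Dict String (List String))
    (x c q : String) :
    q ∈ (gsnIndexStep sequence m x).getD c [] ↔
      q ∈ m.getD c [] ∨
        (getNodeDepth x < (sequence.length : Int) ∧
          (c = (generateNodeNames x (PySem.List.pyGetD sequence (getNodeDepth x) "")).1 ∨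
           c = (generateNodeNames x (PySem.List.pyGetD sequence (getNodeDepth x) "")).2) ∧ q = x) := by
  unfold gsnIndexStep
  by_cases hlt : getNodeDepth x < (sequence.length : Int)
  · rw [if_pos hlt]
    simp only [List.foldl_cons, List.foldl_nil, PySem.Dict.getD_modify]
    split_ifs with h2 h1 h1 <;>
      simp_all [List.mem_append]
  · rw [if_neg hlt]
    simp [hlt]

-- membership in the full index
theorem mem_parent_of (tree sequence : List String) (c q : String) :
    q ∈ (tree.foldl (gsnIndexStep sequence) PySem.Dict.empty).getD c [] ↔
      ∃ x ∈ tree, getNodeDepth x < (sequence.length : Int) ∧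
        (c = (generateNodeNames x (PySem.List.pyGetD sequence (getNodeDepth x) "")).1 ∨
         c = (generateNodeNames x (PySem.List.pyGetD sequence (getNodeDepth x) "")).2) ∧ q = x := by
  have h := foldl_acc_mem (gsnIndexStep sequence)
    (fun m (cq : String × String) => cq.2 ∈ m.getD cq.1 [])
    (fun x cq => getNodeDepth x < (sequence.length : Int) ∧
        (cq.1 = (generateNodeNames x (PySem.List.pyGetD sequence (getNodeDepth x) "")).1 ∨
         cq.1 = (generateNodeNames x (PySem.List.pyGetD sequence (getNodeDepth x) "")).2) ∧ cq.2 = x)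
    (fun m x cq => mem_getD_indexStep sequence m x cq.1 cq.2)
    tree PySem.Dict.empty (c, q)
  simpa [PySem.Dict.getD_empty] using h

-- membership in a set after Set.update
theorem mem_set_update {α : Type} [BEq α] [LawfulBEq α] (s : PySem.Set α) (l : List α) (q : α) :
    q ∈ PySem.Set.update s l ↔ q ∈ s ∨ q ∈ l := by
  unfold PySem.Set.update
  have h := foldl_acc_mem PySem.Set.add (fun s q => q ∈ s) (fun b q => q = b)
    (fun s b q => by show q ∈ s.add b ↔ _; rw [PySem.Set.mem_add]) l s q
  simpa using h

-- membership in occupied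
theorem mem_occupied (tree : List String)
    (parent_of : PySem.Dict String (List String)) (q : String) :
    q ∈ tree.foldl (fun occupied y => PySem.Set.update occupied (parent_of.getD y [])) PySem.Set.empty ↔
      ∃ y ∈ tree, q ∈ parent_of.getD y [] := by
  have h := foldl_acc_mem (fun occupied y => PySem.Set.update occupied (parent_of.getD y []))
    (fun (s : PySem.Set String) q => q ∈ s) (fun y q => q ∈ parent_of.getD y [])
    (fun s y q => mem_set_update s (parent_of.getD y []) q) tree PySem.Set.empty q
  simpa [PySem.Set.empty] using h

-- A's foldl, re-expressed as a filter
theorem gsn_A_filter (tree sequence : List String) :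
    getSplitableNodes tree sequence = tree.filter (fun x =>
      decide (getNodeDepth x < (sequence.length : Int)) &&
        !(tree.contains (generateNodeNames x (PySem.List.pyGetD sequence (getNodeDepth x) "")).1
          || tree.contains (generateNodeNames x (PySem.List.pyGetD sequence (getNodeDepth x) "")).2)) := by
  unfold getSplitableNodes
  have hbody : (fun (splitableNodes : List String) (x : String) =>
      let depth := getNodeDepth x
      if depth < (sequence.length : Int) then
        let lr := generateNodeNames x (PySem.List.pyGetD sequence depth "")
        if tree.contains lr.1 || tree.contains lr.2 then
          splitableNodes
        else
          splitableNodes ++ [x]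
      else splitableNodes)
      = (fun acc x => if (decide (getNodeDepth x < (sequence.length : Int)) &&
        !(tree.contains (generateNodeNames x (PySem.List.pyGetD sequence (getNodeDepth x) "")).1
          || tree.contains (generateNodeNames x (PySem.List.pyGetD sequence (getNodeDepth x) "")).2)) = true then acc ++ [x] else acc) := by
    funext acc x
    by_cases h1 : getNodeDepth x < (sequence.length : Int)
    · rw [if_pos h1]
      by_cases h2 : (tree.contains (generateNodeNames x (PySem.List.pyGetD sequence (getNodeDepth x) "")).1
          || tree.contains (generateNodeNames x (PySem.List.pyGetD sequence (getNodeDepth x) "")).2) = true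
      · rw [if_pos h2, if_neg (by rw [h2]; simp)]
      · rw [Bool.not_eq_true] at h2
        rw [if_neg (by rw [h2]; simp), if_pos (by rw [h2]; simp [h1])]
    · simp [h1]
  rw [hbody]
  have h := PySem.List.foldl_append_if (fun x =>
      decide (getNodeDepth x < (sequence.length : Int)) &&
        !(tree.contains (generateNodeNames x (PySem.List.pyGetD sequence (getNodeDepth x) "")).1
          || tree.contains (generateNodeNames x (PySem.List.pyGetD sequence (getNodeDepth x) "")).2)) id tree []
  simpa using h

theorem getSplitableNodes_eq_alt : ∀ (tree sequence : List String),
    getSplitableNodes tree sequence = getSplitableNodes_alt tree sequence := by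
  intro tree sequence
  rw [gsn_A_filter]
  unfold getSplitableNodes_alt
  simp only []
  apply List.filter_congr
  intro x hx
  by_cases hlt : getNodeDepth x < (sequence.length : Int)
  · simp only [hlt, decide_true, Bool.true_and]
    have hiff : ((tree.foldl (fun occupied y =>
          PySem.Set.update occupied ((tree.foldl (gsnIndexStep sequence) PySem.Dict.empty).getD y []))
          PySem.Set.empty).contains x = true) ↔
        (tree.contains (generateNodeNames x (PySem.List.pyGetD sequence (getNodeDepth x) "")).1
          || tree.contains (generateNodeNames x (PySem.List.pyGetD sequence (getNodeDepth x) "")).2) = true := by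
      rw [PySem.Set.contains_iff, mem_occupied]
      simp only [Bool.or_eq_true, List.contains_iff_mem]
      constructor
      · rintro ⟨y, hy, hmem⟩
        rw [mem_parent_of] at hmem
        obtain ⟨x', hx', hd', hc', rfl⟩ := hmem
        rcases hc' with rfl | rfl
        · exact Or.inl hy
        · exact Or.inr hy
      · rintro (hc | hc)
        · exact ⟨_, hc, (mem_parent_of tree sequence
            (generateNodeNames x (PySem.List.pyGetD sequence (getNodeDepth x) "")).1 x).mpr
            ⟨x, hx, hlt, Or.inl rfl, rfl⟩⟩
        · exact ⟨_, hc, (mem_parent_of tree sequence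
            (generateNodeNames x (PySem.List.pyGetD sequence (getNodeDepth x) "")).2 x).mpr
            ⟨x, hx, hlt, Or.inr rfl, rfl⟩⟩
    rw [Bool.eq_iff_iff, Bool.not_eq_true', Bool.not_eq_true', ← Bool.not_eq_true, ← Bool.not_eq_true]
    exact not_congr hiff.symm
  · simp [hlt]

-- ===== VERDICT (by name: the statement is the Claim_ definition above) =====
theorem getSplitableNodes_spec : Claim_equal_getSplitableNodes := by
  intro tree sequence _
  unfold Spec_getSplitableNodes
  exact getSplitableNodes_eq_alt tree sequence
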